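-- pv_equiv track=rewrite | github.com/Darshan-Radadiya/leetcode-problems | leetcode/LineSweep & Intervals/2237-CountPositionsOnStreetWithRequiredBrightness-M.py | meetRequirement
-- ===== SOURCE A (Python) =====
-- from typing import List
-- from collections import defaultdict
--
-- def meetRequirement(n: int, lights: List[List[int]], requirement: List[int]) -> int:
--     line = defaultdict(int)
--     for start, end in lights:
--         line[max(0, start - end)] += 1
--         line[min(n-1, start + end) + 1] -= 1
--     res, total = 0, 0
--     for i in range(n):
--         total += line[i]
--         if total >= requirement[i]:
--             res += 1
--     return res
-- ===== SOURCE B (Python) =====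
-- from typing import List
-- from collections import deque
--
-- def meetRequirement(n: int, lights: List[List[int]], requirement: List[int]) -> int:
--     # event list: (position, delta) for each light's clamped interval; drop events outside [0, n)
--     events = []
--     for light in lights:
--         start, end = light
--         lo = max(0, start - end)
--         hi = min(n - 1, start + end) + 1
--         if lo < n:
--             events.append((lo, 1))
--         if 0 <= hi < n:
--             events.append((hi, -1))
--     events.sort(key=lambda e: e[0])
--     events = deque(events)
--     res = total = 0
--     for i in range(n):
--         while events and events[0][0] <= i:
--             total += events.popleft()[1]
--         if total >= requirement[i]:
--             res += 1
--     return res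
-- ===== Notes on version B (the rewrite author's own statement) =====
-- stated objective: alternative
-- what changed: Replaces the position-indexed difference dictionary with a sorted event list swept by a pointer that drains all events at or before each position before the requirement check; Pre_ excludes only inputs where A raises (a light without exactly 2 entries, or requirement shorter than n).
import Mathlib
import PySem

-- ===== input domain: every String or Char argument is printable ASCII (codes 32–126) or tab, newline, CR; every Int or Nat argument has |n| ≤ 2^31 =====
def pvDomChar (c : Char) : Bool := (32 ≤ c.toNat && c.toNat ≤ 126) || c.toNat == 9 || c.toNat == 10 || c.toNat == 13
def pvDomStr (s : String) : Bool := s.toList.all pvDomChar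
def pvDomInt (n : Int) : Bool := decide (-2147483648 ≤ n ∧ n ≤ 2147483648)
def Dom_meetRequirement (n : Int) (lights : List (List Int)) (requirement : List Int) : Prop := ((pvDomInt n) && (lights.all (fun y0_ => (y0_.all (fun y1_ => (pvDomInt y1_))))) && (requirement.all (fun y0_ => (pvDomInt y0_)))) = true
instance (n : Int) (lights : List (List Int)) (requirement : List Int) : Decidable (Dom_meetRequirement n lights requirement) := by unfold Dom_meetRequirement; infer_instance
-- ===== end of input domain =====

-- B replaces A's position-indexed difference dictionary by a sorted event list swept with a
-- pointer; same return value, no claim of speed.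

-- ===== PORT A =====
-- line[k] += 1 / -= 1 on a defaultdict(int) is Dict.modify k 0 (· + 1) / (· + (-1)).
def meetRequirement (n : Int) (lights : List (List Int)) (requirement : List Int) : Int :=
  let line : PySem.Dict Int Int := lights.foldl (fun d light =>
    let start := PySem.List.pyGetD light 0 0
    let e := PySem.List.pyGetD light 1 0
    let d := d.modify (max 0 (start - e)) 0 (· + 1)
    d.modify (min (n - 1) (start + e) + 1) 0 (· + (-1))) PySem.Dict.empty
  let st := (PySem.List.pyRange 0 n 1).foldl (fun (st : Int × Int) i =>
    let total := st.2 + line.getD i 0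
    (if total ≥ PySem.List.pyGetD requirement i 0 then st.1 + 1 else st.1, total)) (0, 0)
  st.1

-- ===== PORT B =====
-- the inner 'while events and events[0][0] <= i: total += events.popleft()[1]' loop
def drainEvents (i : Int) : List (Int × Int) → Int → List (Int × Int) × Int
  | [], total => ([], total)
  | (p, d) :: rest, total =>
      if p ≤ i then drainEvents i rest (total + d) else ((p, d) :: rest, total)

def meetRequirement_alt (n : Int) (lights : List (List Int)) (requirement : List Int) : Int :=
  let events : List (Int × Int) := lights.foldl (fun evs light =>
    let start := PySem.List.pyGetD light 0 0
    let e := PySem.List.pyGetD light 1 0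
    let lo := max 0 (start - e)
    let hi := min (n - 1) (start + e) + 1
    let evs := if lo < n then evs ++ [(lo, (1 : Int))] else evs
    if 0 ≤ hi ∧ hi < n then evs ++ [(hi, (-1 : Int))] else evs) []
  let sortedE := PySem.List.sorted events (fun e => e.1) false
  let st := (PySem.List.pyRange 0 n 1).foldl (fun (st : List (Int × Int) × Int × Int) i =>
    let rt := drainEvents i st.1 st.2.1
    (rt.1, rt.2, if rt.2 ≥ PySem.List.pyGetD requirement i 0 then st.2.2 + 1 else st.2.2))
    (sortedE, 0, 0)
  st.2.2

-- ===== PRECONDITION & SPEC =====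
-- Pre_ excludes exactly the inputs where A raises: a light that does not unpack into
-- (start, end) (ValueError), or requirement[i] out of range for some i < n (IndexError).
def Pre_meetRequirement (n : Int) (lights : List (List Int)) (requirement : List Int) : Prop :=
  (∀ l ∈ lights, l.length = 2) ∧ n ≤ (requirement.length : Int)
instance (n : Int) (lights : List (List Int)) (requirement : List Int) : Decidable (Pre_meetRequirement n lights requirement) := by unfold Pre_meetRequirement; infer_instance

def pvWitness_meetRequirement : Int × List (List Int) × List Int := (2, [[0, 1]], [1, 2])

def Spec_meetRequirement (n : Int) (lights : List (List Int)) (requirement : List Int) (out : Int) : Prop := out = meetRequirement_alt n lights requirement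
instance (n : Int) (lights : List (List Int)) (requirement : List Int) (out : Int) : Decidable (Spec_meetRequirement n lights requirement out) := by unfold Spec_meetRequirement; infer_instance

-- ===== CLAIM (what is proved, stated in full; the proofs are below) =====
def Claim_equal_meetRequirement : Prop := ∀ (n : Int) (lights : List (List Int)) (requirement : List Int), Dom_meetRequirement n lights requirement → Pre_meetRequirement n lights requirement → Spec_meetRequirement n lights requirement (meetRequirement n lights requirement)

-- ===== LEMMAS AND PROOFS =====

-- per-light delta contributed to position k by A's difference dictionary
def delta (n : Int) (light : List Int) (k : Int) : Int :=
  (if max 0 (PySem.List.pyGetD light 0 0 - PySem.List.pyGetD light 1 0) = k then 1 else 0) +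
  (if min (n - 1) (PySem.List.pyGetD light 0 0 + PySem.List.pyGetD light 1 0) + 1 = k then -1 else 0)

def lineSum (n : Int) (lights : List (List Int)) (k : Int) : Int :=
  (lights.map (fun l => delta n l k)).sum

lemma getD_two_modify (d : PySem.Dict Int Int) (K1 K2 k : Int) :
    ((d.modify K1 0 (· + 1)).modify K2 0 (· + (-1))).getD k 0
      = d.getD k 0 + ((if K1 = k then 1 else 0) + (if K2 = k then -1 else 0)) := by
  rw [PySem.Dict.getD_modify, PySem.Dict.getD_modify, PySem.Dict.getD_modify]
  rcases eq_or_ne k K2 with rfl | h2 <;> rcases eq_or_ne k K1 with rfl | h1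
  · simp
  · simp [Ne.symm h1, h1]
  · simp [Ne.symm h2, h2]
  · simp [Ne.symm h1, Ne.symm h2, h1, h2]

-- A's dictionary looked up at k is the sum of per-light deltas at k
lemma getD_lineA (n : Int) (lights : List (List Int)) (k : Int) (d : PySem.Dict Int Int) :
    (lights.foldl (fun d light =>
      let start := PySem.List.pyGetD light 0 0
      let e := PySem.List.pyGetD light 1 0
      let d := d.modify (max 0 (start - e)) 0 (· + 1)
      d.modify (min (n - 1) (start + e) + 1) 0 (· + (-1))) d).getD k 0
      = d.getD k 0 + lineSum n lights k := by
  induction lights generalizing d with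
  | nil => simp [lineSum]
  | cons l ls ih =>
      simp only [List.foldl_cons, ih, lineSum, List.map_cons, List.sum_cons, delta]
      rw [getD_two_modify]
      ring

-- the per-light kept events of B
def evtsOf (n : Int) (light : List Int) : List (Int × Int) :=
  let start := PySem.List.pyGetD light 0 0
  let e := PySem.List.pyGetD light 1 0
  let lo := max 0 (start - e)
  let hi := min (n - 1) (start + e) + 1
  (if lo < n then [(lo, (1 : Int))] else []) ++ (if 0 ≤ hi ∧ hi < n then [(hi, (-1 : Int))] else [])

lemma eventsB_eq_flatMap (n : Int) (lights : List (List Int)) (acc : List (Int × Int)) :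
    (lights.foldl (fun evs light =>
      let start := PySem.List.pyGetD light 0 0
      let e := PySem.List.pyGetD light 1 0
      let lo := max 0 (start - e)
      let hi := min (n - 1) (start + e) + 1
      let evs := if lo < n then evs ++ [(lo, (1 : Int))] else evs
      if 0 ≤ hi ∧ hi < n then evs ++ [(hi, (-1 : Int))] else evs) acc)
      = acc ++ lights.flatMap (evtsOf n) := by
  induction lights generalizing acc with
  | nil => simp
  | cons l ls ih =>
      simp only [List.foldl_cons, ih, List.flatMap_cons, evtsOf]
      split_ifs <;> simp

-- weight of events at positions ≤ i
def wsum (i : Int) (evs : List (Int × Int)) : Int :=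
  (evs.map (fun e => if e.1 ≤ i then e.2 else 0)).sum

lemma wsum_perm (i : Int) {a b : List (Int × Int)} (h : a.Perm b) : wsum i a = wsum i b :=
  (h.map _).sum_eq

lemma wsum_flatMap (i : Int) {α : Type} (g : α → List (Int × Int)) (l : List α) :
    wsum i (l.flatMap g) = (l.map (fun x => wsum i (g x))).sum := by
  induction l with
  | nil => simp [wsum]
  | cons x xs ih => simp only [List.flatMap_cons, wsum, List.map_append, List.sum_append,
      List.map_cons, List.sum_cons] at *; rw [ih]

lemma drainEvents_sorted (i : Int) (evs : List (Int × Int)) (t : Int)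
    (h : evs.Pairwise (fun a b => a.1 ≤ b.1)) :
    drainEvents i evs t = (evs.filter (fun e => decide (i < e.1)), t + wsum i evs) := by
  induction evs generalizing t with
  | nil => simp [drainEvents, wsum]
  | cons e rest ih =>
      obtain ⟨p, d⟩ := e
      rw [List.pairwise_cons] at h
      by_cases hp : p ≤ i
      · rw [drainEvents, if_pos hp, ih _ h.2]
        simp only [wsum, List.map_cons, List.sum_cons, List.filter_cons]
        simp [hp, show ¬ i < p by omega]
        ring
      · rw [drainEvents, if_neg hp]
        have hfilt : List.filter (fun e => decide (i < e.1)) ((p, d) :: rest) = (p, d) :: rest :=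
          List.filter_eq_self.mpr (by
            intro e he
            rcases List.mem_cons.mp he with rfl | he'
            · simp; omega
            · have := h.1 e he'; simp; omega)
        have hw : wsum i ((p, d) :: rest) = 0 := by
          apply List.sum_eq_zero
          intro x hx
          rw [List.mem_map] at hx
          obtain ⟨e, he, rfl⟩ := hx
          rcases List.mem_cons.mp he with rfl | he'
          · simp [show ¬ p ≤ i from hp]
          · have := h.1 e he'; simp [show ¬ e.1 ≤ i by omega]
        rw [hfilt, hw, add_zero]

-- split a ≤-i weight at a ≤ i into the ≤-a part and the part on events past a
lemma wsum_filter_gt (a i : Int) (hai : a ≤ i) (evs : List (Int × Int)) :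
    wsum i evs = wsum a evs + wsum i (evs.filter (fun e => decide (a < e.1))) := by
  induction evs with
  | nil => simp [wsum]
  | cons e rest ih =>
      simp only [wsum, List.map_cons, List.sum_cons, List.filter_cons] at *
      by_cases h : a < e.1
      · simp only [h, decide_true, if_pos, List.map_cons, List.sum_cons]
        have h2 : ¬ e.1 ≤ a := by omega
        rw [if_neg h2]
        by_cases h3 : e.1 ≤ i <;> simp [h3] <;> linarith [ih]
      · simp only [h, decide_false, if_neg, Bool.false_eq_true, not_false_eq_true]
        have h2 : e.1 ≤ a := by omega
        rw [if_pos h2, if_pos (by omega : e.1 ≤ i)]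
        linarith [ih]

lemma sum_ite_eq_mem (v c a b : Int) :
    ((PySem.List.pyRange a b 1).map (fun k => if c = k then v else 0)).sum
      = if a ≤ c ∧ c < b then v else 0 := by
  have h : ∀ m : Nat, ∀ a : Int, b = a + m →
      ((PySem.List.pyRange a b 1).map (fun k => if c = k then v else 0)).sum
        = if a ≤ c ∧ c < b then v else 0 := by
    intro m
    induction m with
    | zero => intro a ha; rw [PySem.List.pyRange_one_eq_nil (by omega)]; simp; omega
    | succ m ih =>
        intro a ha
        rw [PySem.List.pyRange_one_cons (by omega), List.map_cons, List.sum_cons,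
          ih (a + 1) (by push_cast at ha ⊢; omega)]
        split_ifs <;> omega
  by_cases hab : a ≤ b
  · exact h (b - a).toNat a (by omega)
  · rw [PySem.List.pyRange_one_eq_nil (by omega)]; simp; omega

-- per light, B's kept-event weight up to i equals A's prefix of deltas (0 ≤ i < n)
lemma wsum_evtsOf (n i : Int) (hi0 : 0 ≤ i) (hin : i < n) (l : List Int) :
    wsum i (evtsOf n l) = ((PySem.List.pyRange 0 (i + 1) 1).map (fun k => delta n l k)).sum := by
  simp only [delta]
  rw [PySem.List.sum_map_add_int, sum_ite_eq_mem, sum_ite_eq_mem]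
  simp only [evtsOf, wsum]
  split_ifs <;> simp_all <;> omega

-- swap the double sum: positions-then-lights = lights-then-positions
lemma sum_swap {α : Type} (rng : List Int) (ls : List α) (f : α → Int → Int) :
    (rng.map (fun k => (ls.map (fun l => f l k)).sum)).sum
      = (ls.map (fun l => (rng.map (f l)).sum)).sum := by
  induction ls with
  | nil => simp
  | cons l ls ih =>
      simp only [List.map_cons, List.sum_cons, ← ih]
      rw [← PySem.List.sum_map_add_int]

-- the sweep: B's fold (events + pointer) computes the same count as A's fold (prefix sums of L)
lemma sweep (R L : Int → Int) (m : Nat) :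
    ∀ (a : Int) (evs : List (Int × Int)) (tB tA res : Int),
    evs.Pairwise (fun x y => x.1 ≤ y.1) →
    (∀ i, a ≤ i → i < a + (m : Int) →
      tB + wsum i evs = tA + ((PySem.List.pyRange a (i + 1) 1).map L).sum) →
    ((PySem.List.pyRange a (a + (m : Int)) 1).foldl
        (fun (st : List (Int × Int) × Int × Int) i =>
          let rt := drainEvents i st.1 st.2.1
          (rt.1, rt.2, if rt.2 ≥ R i then st.2.2 + 1 else st.2.2)) (evs, tB, res)).2.2
    = ((PySem.List.pyRange a (a + (m : Int)) 1).foldl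
        (fun (st : Int × Int) i =>
          let total := st.2 + L i
          (if total ≥ R i then st.1 + 1 else st.1, total)) (res, tA)).1 := by
  induction m with
  | zero =>
      intro a evs tB tA res _ _
      rw [PySem.List.pyRange_one_eq_nil (by omega)]
      rfl
  | succ m ih =>
      intro a evs tB tA res hsort hinv
      rw [PySem.List.pyRange_one_cons (by push_cast; omega)]
      simp only [List.foldl_cons]
      have hdrain := drainEvents_sorted a evs tB hsort
      have hinva := hinv a (le_refl a) (by push_cast; omega)
      rw [show PySem.List.pyRange a (a + 1) 1 = [a] from PySem.List.pyRange_one_singleton a] at hinva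
      simp only [List.map_cons, List.map_nil, List.sum_cons, List.sum_nil, add_zero] at hinva
      have hstep : a + ((m + 1 : Nat) : Int) = (a + 1) + (m : Int) := by push_cast; ring
      rw [hdrain]
      simp only []
      rw [hstep]
      have := ih (a + 1) (evs.filter (fun e => decide (a < e.1))) (tB + wsum a evs)
        (tA + L a) (if tB + wsum a evs ≥ R a then res + 1 else res)
        (hsort.filter _)
        (by
          intro i hi1 hi2
          have hii : a ≤ i := by omega
          have := hinv i hii (by push_cast at hi2 ⊢; omega)
          rw [wsum_filter_gt a i hii evs] at this
          rw [PySem.List.pyRange_one_cons (by omega : a < i + 1), List.map_cons,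
            List.sum_cons] at this
          linarith)
      rw [this, hinva]

-- ===== VERDICT (by name: the statement is the Claim_ definition above) =====
theorem meetRequirement_spec : Claim_equal_meetRequirement := by
  intro n lights requirement _ _
  simp only [Spec_meetRequirement, meetRequirement, meetRequirement_alt]
  have hev := eventsB_eq_flatMap n lights []
  rw [List.nil_append] at hev
  rw [hev]
  by_cases hn : 0 ≤ n
  · have hsort : (PySem.List.sorted (lights.flatMap (evtsOf n)) (fun e => e.1) false).Pairwise
        (fun x y : Int × Int => x.1 ≤ y.1) := PySem.List.sorted_pairwise _ _
    have hperm := PySem.List.sorted_perm (lights.flatMap (evtsOf n)) (fun e : Int × Int => e.1) false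
    have hinv : ∀ i : Int, 0 ≤ i → i < 0 + (n.toNat : Int) →
        (0 : Int) + wsum i (PySem.List.sorted (lights.flatMap (evtsOf n)) (fun e => e.1) false)
          = 0 + ((PySem.List.pyRange 0 (i + 1) 1).map (fun k =>
              (lights.foldl (fun d light =>
                let start := PySem.List.pyGetD light 0 0
                let e := PySem.List.pyGetD light 1 0
                let d := d.modify (max 0 (start - e)) 0 (· + 1)
                d.modify (min (n - 1) (start + e) + 1) 0 (· + (-1))) PySem.Dict.empty).getD k 0)).sum := by
      intro i h0 h1
      have hiN : i < n := by omega
      rw [wsum_perm i hperm, wsum_flatMap,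
        List.map_congr_left (fun l _ => wsum_evtsOf n i h0 hiN l), ← sum_swap]
      simp only [zero_add]
      congr 1
      apply List.map_congr_left
      intro k _
      rw [getD_lineA n lights k PySem.Dict.empty]
      simp [lineSum, PySem.Dict.getD_empty]
    have hsweep := sweep (fun i => PySem.List.pyGetD requirement i 0)
      (fun k => (lights.foldl (fun d light =>
        let start := PySem.List.pyGetD light 0 0
        let e := PySem.List.pyGetD light 1 0
        let d := d.modify (max 0 (start - e)) 0 (· + 1)
        d.modify (min (n - 1) (start + e) + 1) 0 (· + (-1))) PySem.Dict.empty).getD k 0)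
      n.toNat 0 (PySem.List.sorted (lights.flatMap (evtsOf n)) (fun e => e.1) false)
      0 0 0 hsort hinv
    rw [show (0 : Int) + (n.toNat : Int) = n by omega] at hsweep
    exact hsweep.symm
  · rw [PySem.List.pyRange_one_eq_nil (by omega)]
    rfl
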